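-- pv_equiv track=rewrite | github.com/rossi-jeff/python-games-fastapi | utilities/ten_grand.py | ScoreFourKind
-- ===== SOURCE A (Python) =====
-- from typing import List
--
-- def MapDieFaces(dice: List[int]):
--     dieMap = {}
--     for d in dice:
--         if not d in dieMap:
--             dieMap[d] = 0
--         dieMap[d] = dieMap[d] + 1
--     keys: List[int] = []
--     for k in dieMap.keys():
--         keys.append(k)
--     values: List[int] = []
--     for v in dieMap.values():
--         values.append(v)
--     return dieMap, keys, values
--
-- def ScoreFourKind(dice: List[int]):
--     score = 0
--     dieMap, keys, _ = MapDieFaces(dice)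
--     for k in keys:
--         if dieMap[k] == 4:
--             if k == 1:
--                 score = score + 2000
--             else:
--                 score = score + (k * 200)
--     return score
-- ===== SOURCE B (Python) =====
-- from typing import List
--
-- def ScoreFourKind(dice: List[int]):
--     score = 0
--     s = sorted(dice)
--     n = len(s)
--     i = 0
--     while i < n:
--         j = i + 1
--         while j < n and s[j] == s[i]:
--             j += 1
--         if j - i == 4:
--             score += 2000 if s[i] == 1 else s[i] * 200
--         i = j
--     return score
-- ===== Notes on version B (the rewrite author's own statement) =====
-- stated objective: alternative
-- what changed: Replaces the dict-counting pass (build a count map, collect its keys, then score keys with count 4) by a sort-then-run-scan: sort a copy of the dice and walk it with two indices, scoring each maximal run of equal values whose length is exactly 4.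
import Mathlib
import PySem

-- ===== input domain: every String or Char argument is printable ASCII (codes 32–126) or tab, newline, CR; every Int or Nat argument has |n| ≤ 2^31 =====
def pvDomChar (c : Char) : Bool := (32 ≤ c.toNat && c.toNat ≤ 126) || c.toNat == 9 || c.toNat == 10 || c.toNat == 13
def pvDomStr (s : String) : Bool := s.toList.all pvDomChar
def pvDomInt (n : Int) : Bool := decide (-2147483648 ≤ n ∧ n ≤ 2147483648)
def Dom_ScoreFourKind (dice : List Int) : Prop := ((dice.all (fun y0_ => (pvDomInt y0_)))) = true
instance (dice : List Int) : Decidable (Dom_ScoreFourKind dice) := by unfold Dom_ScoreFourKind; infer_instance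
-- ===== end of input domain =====

-- B replaces A's dict-counting pass by sorting a copy and scanning maximal runs of equal values
-- (alternative decomposition, same result; A does not mutate its argument and neither does B).

-- ===== PORT A =====
-- MapDieFaces: build the count dict, then collect keys and values by appending in loops.
def MapDieFaces (dice : List Int) : PySem.Dict Int Int × List Int × List Int :=
  let dieMap : PySem.Dict Int Int :=
    dice.foldl (fun dieMap d =>
      let dieMap := if dieMap.contains d then dieMap else dieMap.insert d 0
      dieMap.insert d (dieMap.getD d 0 + 1)) PySem.Dict.empty
  let keys : List Int := dieMap.keys.foldl (fun acc k => acc ++ [k]) []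
  let values : List Int := dieMap.values.foldl (fun acc v => acc ++ [v]) []
  (dieMap, keys, values)

def ScoreFourKind (dice : List Int) : Int :=
  let m := MapDieFaces dice
  let dieMap := m.1
  let keys := m.2.1
  keys.foldl (fun score k =>
    if dieMap.getD k 0 == 4 then
      if k == 1 then score + 2000 else score + k * 200
    else score) 0

-- ===== PORT B =====
-- Two-pointer scan over the sorted copy: each step consumes one maximal run of equal
-- values (the inner 'while j < n and s[j] == s[i]' = takeWhile/dropWhile on the rest)
-- and scores it iff its length j - i is exactly 4.
def pvScanRuns (s : List Int) : Int :=
  match s with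
  | [] => 0
  | v :: rest =>
      (if (1 + ((rest.takeWhile (fun x => x == v)).length : Int)) = 4 then
        (if v == 1 then 2000 else v * 200) else 0)
      + pvScanRuns (rest.dropWhile (fun x => x == v))
termination_by s.length
decreasing_by
  simp only [List.length_cons]
  exact Nat.lt_succ_of_le (List.length_dropWhile_le _ _)

def ScoreFourKind_alt (dice : List Int) : Int :=
  pvScanRuns (PySem.List.sorted dice (fun x => x) false)

-- ===== PRECONDITION & SPEC =====
def Spec_ScoreFourKind (dice : List Int) (out : Int) : Prop := out = ScoreFourKind_alt dice
instance (dice : List Int) (out : Int) : Decidable (Spec_ScoreFourKind dice out) := by unfold Spec_ScoreFourKind; infer_instance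

-- ===== CLAIM (what is proved, stated in full; the proofs are below) =====
def Claim_equal_ScoreFourKind : Prop := ∀ (dice : List Int), Dom_ScoreFourKind dice → Spec_ScoreFourKind dice (ScoreFourKind dice)

-- ===== LEMMAS AND PROOFS =====

-- the score contributed by a single face value v occurring c times in the dice
def pvFace (dice : List Int) (v : Int) : Int :=
  if (dice.count v : Int) = 4 then (if v = 1 then 2000 else v * 200) else 0

-- A's dict-building loop is the Counter loop.
theorem dieMap_eq_counter (dice : List Int) :
    dice.foldl (fun dieMap d =>
      let dieMap := if dieMap.contains d then dieMap else dieMap.insert d 0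
      dieMap.insert d (dieMap.getD d 0 + 1)) PySem.Dict.empty
    = PySem.Dict.counter dice := by
  rw [← PySem.Dict.foldl_insert_getD_add_one_eq_counter]
  apply PySem.List.foldl_congr_mem
  intro d x _
  by_cases hc : d.contains x
  · simp [hc]
  · simp only [Bool.not_eq_true] at hc
    simp [hc, PySem.Dict.getD_insert_self, PySem.Dict.insert_insert_self,
      PySem.Dict.getD_of_not_contains d (0 : Int) hc]

-- A's value: the sum of pvFace over the distinct faces (first-occurrence order).
theorem scoreA_eq_sum (dice : List Int) :
    ScoreFourKind dice = ((PySem.Set.ofList dice).map (pvFace dice)).sum := by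
  unfold ScoreFourKind MapDieFaces
  simp only [dieMap_eq_counter, PySem.List.foldl_append_singleton_eq_self, List.nil_append]
  have hstep : ∀ (score k : Int),
      (if (PySem.Dict.counter dice).getD k 0 == 4 then
        if k == 1 then score + 2000 else score + k * 200
       else score) = score + pvFace dice k := by
    intro score k
    simp only [PySem.Dict.getD_counter, pvFace, beq_iff_eq]
    split_ifs <;> simp
  simp only [hstep]
  rw [PySem.List.foldl_add, PySem.Dict.keys_counter]
  simp

-- In a ≤-sorted list headed by v, everything past the run of v's differs from v.
theorem not_mem_dropWhile_of_sorted {v : Int} {rest : List Int}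
    (hp : (v :: rest).Pairwise (· ≤ ·)) :
    v ∉ rest.dropWhile (fun x => x == v) := by
  intro hmem
  have hrest : rest.Pairwise (· ≤ ·) := hp.sublist (List.sublist_cons_self _ _)
  have hdp : (rest.dropWhile (fun x => x == v)).Pairwise (· ≤ ·) :=
    hrest.sublist (List.dropWhile_sublist _)
  cases hd : rest.dropWhile (fun x => x == v) with
  | nil => simp [hd] at hmem
  | cons w tl =>
    have hwne : ¬ (w == v) = true := by
      have := List.head?_dropWhile_not (fun x => x == v) rest
      rw [hd] at this; simpa using this
    have hwv : w ≠ v := by simpa using hwne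
    have hvw : v ≤ w := by
      have hw_mem : w ∈ rest := (List.dropWhile_sublist (l := rest) (p := fun x => x == v)).subset (by simp [hd])
      exact (List.pairwise_cons.mp hp).1 w hw_mem
    rw [hd] at hmem hdp
    rcases List.mem_cons.mp hmem with h | h
    · exact hwv h.symm
    · have : w ≤ v := (List.pairwise_cons.mp hdp).1 v h
      have : w = v := le_antisymm this hvw
      exact hwv this

-- Elements of the take-while run are all v.
theorem mem_takeWhile_eq {v x : Int} {rest : List Int}
    (h : x ∈ rest.takeWhile (fun y => y == v)) : x = v := by
  have := List.mem_takeWhile_imp h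
  simpa using this

-- For t consisting only of v's and v ∉ dr: set(t ++ dr) with v discarded is set(dr).
theorem discard_ofList_run {v : Int} {t dr : List Int}
    (ht : ∀ x ∈ t, x = v) (hdr : v ∉ dr) :
    (PySem.Set.ofList (t ++ dr)).discard v = PySem.Set.ofList dr := by
  induction t with
  | nil =>
    simp only [List.nil_append, PySem.Set.discard]
    exact List.filter_eq_self.mpr (fun y hy => by
      simp only [Bool.not_eq_eq_eq_not, Bool.not_true, beq_eq_false_iff_ne]
      intro hyv; exact hdr (hyv ▸ (PySem.Set.mem_ofList dr y).mp hy))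
  | cons a t ih =>
    have hav : a = v := ht a (List.mem_cons_self)
    have ht' : ∀ x ∈ t, x = v := fun x hx => ht x (List.mem_cons_of_mem _ hx)
    subst hav
    rw [List.cons_append, PySem.Set.ofList_cons, PySem.Set.discard]
    simp only [List.filter_cons]
    have : (!a == a) = false := by simp
    rw [this]
    simp only [Bool.false_eq_true, if_false]
    have : List.filter (fun y => !y == a) ((PySem.Set.ofList (t ++ dr)).discard a)
        = (PySem.Set.ofList (t ++ dr)).discard a := by
      apply List.filter_eq_self.mpr
      intro y hy
      simp only [PySem.Set.discard, List.mem_filter] at hy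
      exact hy.2
    rw [this, ih ht']

-- The run-scan of a ≤-sorted list is the sum of pvFace over its distinct faces.
theorem scanRuns_eq_sum (l : List Int) (hp : l.Pairwise (· ≤ ·)) :
    pvScanRuns l = ((PySem.Set.ofList l).map (pvFace l)).sum := by
  induction l using pvScanRuns.induct with
  | case1 => simp [pvScanRuns, PySem.Set.ofList]
  | case2 v rest ih =>
    set t := rest.takeWhile (fun x => x == v) with htdef
    set dr := rest.dropWhile (fun x => x == v) with hdrdef
    have hrest : rest = t ++ dr := (List.takeWhile_append_dropWhile).symm
    have ht : ∀ x ∈ t, x = v := fun x hx => mem_takeWhile_eq hx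
    have hdr : v ∉ dr := not_mem_dropWhile_of_sorted hp
    have hdp : dr.Pairwise (· ≤ ·) :=
      (hp.sublist (List.sublist_cons_self _ _)).sublist (List.dropWhile_sublist _)
    -- counts
    have hcount_t : t.count v = t.length := by
      rw [List.count_eq_length]; intro a ha; exact ((ht a ha) ▸ rfl)
    have hcount_v : ((v :: rest).count v : Int) = 1 + (t.length : Int) := by
      rw [hrest, List.count_cons_self, List.count_append, List.count_eq_zero_of_not_mem hdr,
        hcount_t]
      push_cast; ring
    have hcount_u : ∀ u, u ≠ v → (v :: rest).count u = dr.count u := by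
      intro u hu
      rw [hrest]
      simp [List.count_append, Ne.symm hu,
        List.count_eq_zero_of_not_mem (fun hmem => hu (ht u hmem))]
    -- distinct faces
    have hset : PySem.Set.ofList (v :: rest) = v :: PySem.Set.ofList dr := by
      rw [PySem.Set.ofList_cons, hrest, discard_ofList_run ht hdr]
    -- unfold one scan step
    rw [pvScanRuns, hset, List.map_cons, List.sum_cons]
    congr 1
    · simp only [pvFace, ← htdef, hcount_v, beq_iff_eq]
    · rw [ih hdp]
      apply congrArg
      apply List.map_congr_left
      intro u hu
      have huv : u ≠ v := by
        intro h; subst h; exact hdr ((PySem.Set.mem_ofList dr u).mp hu)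
      simp only [pvFace, hcount_u u huv]

-- ===== VERDICT (by name: the statement is the Claim_ definition above) =====
theorem ScoreFourKind_spec : Claim_equal_ScoreFourKind := by
  intro dice _
  show ScoreFourKind dice = ScoreFourKind_alt dice
  set s := PySem.List.sorted dice (fun x => x) false with hsdef
  have hperm : s.Perm dice := PySem.List.sorted_perm dice (fun x => x) false
  have hpw : s.Pairwise (· ≤ ·) := by
    have := PySem.List.sorted_pairwise dice (fun x => x)
    simpa using this
  rw [scoreA_eq_sum]
  unfold ScoreFourKind_alt
  rw [scanRuns_eq_sum _ hpw]
  have hface : ∀ v, pvFace s v = pvFace dice v := by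
    intro v; unfold pvFace; rw [hperm.count_eq]
  have hsetperm : (PySem.Set.ofList dice).Perm (PySem.Set.ofList s) := by
    rw [List.perm_ext_iff_of_nodup (PySem.Set.nodup_ofList _) (PySem.Set.nodup_ofList _)]
    intro a
    rw [PySem.Set.mem_ofList, PySem.Set.mem_ofList]
    exact ⟨fun h => hperm.mem_iff.mpr h, fun h => hperm.mem_iff.mp h⟩
  calc ((PySem.Set.ofList dice).map (pvFace dice)).sum
      = ((PySem.Set.ofList s).map (pvFace dice)).sum := (hsetperm.map _).sum_eq
    _ = ((PySem.Set.ofList s).map (pvFace s)).sum := by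
        apply congrArg; exact (List.map_congr_left (fun u _ => (hface u).symm))
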